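-- pv_equiv track=rewrite | github.com/BarquistLab/mason | browser/pnag/mismatch_generator.py | generate_mismatch_sequences
-- ===== SOURCE A (Python) =====
-- from itertools import combinations
--
-- def generate_mismatch_sequences(seq_str, num_mismatches):
--     """Generate all mismatch sequences by swapping pairs of non-equal bases.
--
--     Args:
--         seq_str: The original sequence string.
--         num_mismatches: Number of mismatches to introduce (must be even).
--
--     Returns:
--         List of (name, sequence_string) tuples.
--     """
--     seq_len = len(seq_str)
--     num_swaps = num_mismatches // 2
--
--     # Find all pairs of positions where bases differ
--     diff_pairs = []
--     for i in range(seq_len):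
--         for j in range(i + 1, seq_len):
--             if seq_str[i] != seq_str[j]:
--                 diff_pairs.append((i, j))
--
--     # Generate all combinations of num_swaps non-overlapping pairs
--     results = []
--     seen = set()
--
--     for swap_combo in combinations(diff_pairs, num_swaps):
--         # Check that all positions in this combination are unique (non-overlapping)
--         positions = []
--         for pair in swap_combo:
--             positions.extend(pair)
--         if len(set(positions)) != len(positions):
--             continue
--
--         # Apply the swaps
--         seq_list = list(seq_str)
--         for i, j in swap_combo:
--             seq_list[i], seq_list[j] = seq_list[j], seq_list[i]
--
--         new_seq = ''.join(seq_list)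
--
--         # Skip duplicates and the original sequence
--         if new_seq in seen or new_seq == seq_str:
--             continue
--
--         # Filter: max consecutive matching bases with original must be < 6
--         max_consec = 0
--         consec = 0
--         for a, b in zip(seq_str, new_seq):
--             if a == b:
--                 consec += 1
--                 max_consec = max(max_consec, consec)
--             else:
--                 consec = 0
--         if max_consec >= 6:
--             continue
--
--         seen.add(new_seq)
--
--         name = f"PNA_mm_{len(results) + 1:03d}"
--         results.append((name, new_seq))
--
--     return results
-- ===== SOURCE B (Python) =====
-- def _max_match_run(a, b):
--     """Length of the longest run of positions where a and b agree."""
--     best = cur = 0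
--     for x, y in zip(a, b):
--         if x == y:
--             cur += 1
--         else:
--             best = max(best, cur)
--             cur = 0
--     return max(best, cur)
--
--
-- def generate_mismatch_sequences(seq_str, num_mismatches):
--     """Backtracking re-implementation: prune overlapping pairs during selection."""
--     n = len(seq_str)
--     num_swaps = num_mismatches // 2
--     diff_pairs = [(i, j) for i in range(n) for j in range(i + 1, n)
--                   if seq_str[i] != seq_str[j]]
--
--     # Enumerate, in lexicographic index order, all selections of num_swaps
--     # pairwise non-overlapping pairs, pruning overlaps as we go.
--     selections = []
--     chosen = []
--     used = set()
--
--     def backtrack(start, need):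
--         if need == 0:
--             selections.append(list(chosen))
--             return
--         for idx in range(start, len(diff_pairs)):
--             i, j = diff_pairs[idx]
--             if i in used or j in used:
--                 continue
--             used.add(i)
--             used.add(j)
--             chosen.append((i, j))
--             backtrack(idx + 1, need - 1)
--             chosen.pop()
--             used.discard(i)
--             used.discard(j)
--
--     backtrack(0, num_swaps)
--
--     candidates = []
--     for combo in selections:
--         chars = list(seq_str)
--         for i, j in combo:
--             chars[i], chars[j] = chars[j], chars[i]
--         candidates.append(''.join(chars))
--
--     kept = []
--     seen = set()
--     for cand in candidates:
--         if cand in seen: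
--             continue
--         seen.add(cand)
--         if cand != seq_str and _max_match_run(seq_str, cand) < 6:
--             kept.append(cand)
--
--     return [("PNA_mm_%03d" % (k + 1), s) for k, s in enumerate(kept)]
-- ===== Notes on version B (the rewrite author's own statement) =====
-- stated objective: alternative
-- what changed: Replaces itertools.combinations over all pair-combinations followed by an overlap post-check with a recursive backtracking enumerator that carries a set of used positions and prunes overlapping pairs during selection, and restructures the post-processing into dedup-then-filter passes with naming by final enumeration.
import Mathlib
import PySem

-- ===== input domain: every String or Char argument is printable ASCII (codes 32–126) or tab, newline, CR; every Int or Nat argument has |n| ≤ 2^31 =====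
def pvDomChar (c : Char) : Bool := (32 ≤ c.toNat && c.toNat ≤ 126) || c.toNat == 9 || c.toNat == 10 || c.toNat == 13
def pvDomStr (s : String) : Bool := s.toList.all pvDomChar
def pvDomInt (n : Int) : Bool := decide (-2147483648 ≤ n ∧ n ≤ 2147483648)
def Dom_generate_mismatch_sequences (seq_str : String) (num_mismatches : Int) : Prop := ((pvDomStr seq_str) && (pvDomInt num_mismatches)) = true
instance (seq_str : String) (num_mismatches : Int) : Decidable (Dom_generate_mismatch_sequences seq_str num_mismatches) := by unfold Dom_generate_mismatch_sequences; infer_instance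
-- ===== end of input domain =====

-- B replaces A's flat combinations-then-overlap-check enumeration by recursive backtracking
-- that prunes overlapping pairs during selection (same results, same order); alternative algorithm.

-- zero-pad to width 3, i.e. Python's f"{n:03d}" for n ≥ 0 (shared formatting helper)
def pvPad3 (n : Nat) : String :=
  let ds := PySem.Int.toChars (Int.ofNat n)
  String.ofList (List.replicate (3 - ds.length) '0' ++ ds)

-- ===== PORT A =====
-- itertools.combinations(l, k) in lexicographic order (CPython returns an
-- empty iterator immediately when k exceeds the pool size)
def pyCombinations {α : Type} (l : List α) (k : Nat) : List (List α) :=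
  if l.length < k then []
  else
    match k, l with
    | 0, _ => [[]]
    | _+1, [] => []
    | k+1, x :: xs => (pyCombinations xs k).map (fun c => x :: c) ++ pyCombinations xs (k+1)
termination_by l.length
decreasing_by all_goals simp_all

-- the body of A's `for swap_combo in combinations(...)` loop
def pvAStep (seq_str : String) (cs : List Char)
    (st : List (String × String) × PySem.Set String)
    (swap_combo : List (Nat × Nat)) : List (String × String) × PySem.Set String :=
  let positions : List Nat := swap_combo.foldl (fun acc p => acc ++ [p.1, p.2]) []
  if (PySem.Set.ofList positions).length ≠ positions.length then st
  else
    let seq_list := swap_combo.foldl (fun l p =>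
      let a := l.getD p.2 ' '
      let b := l.getD p.1 ' '
      (l.set p.1 a).set p.2 b) cs
    let new_seq := String.ofList seq_list
    if st.2.contains new_seq ∨ new_seq = seq_str then st
    else
      let mc := (cs.zip seq_list).foldl (fun (p : Nat × Nat) ab =>
        if ab.1 = ab.2 then (max p.1 (p.2 + 1), p.2 + 1) else (p.1, 0)) (0, 0)
      if 6 ≤ mc.1 then st
      else (st.1 ++ [("PNA_mm_" ++ pvPad3 (st.1.length + 1), new_seq)],
            PySem.Set.add st.2 new_seq)

-- `num_swaps.toNat`: for num_mismatches < 0 Python's combinations raises ValueError (outside Pre_)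
def generate_mismatch_sequences (seq_str : String) (num_mismatches : Int) : List (String × String) :=
  let cs := seq_str.toList
  let seq_len := cs.length
  let num_swaps := (PySem.Int.floordiv num_mismatches 2).toNat
  let diff_pairs := (List.range seq_len).foldl (fun acc i =>
    (List.range' (i + 1) (seq_len - (i + 1))).foldl (fun acc2 j =>
      if cs.getD i ' ' ≠ cs.getD j ' ' then acc2 ++ [(i, j)] else acc2) acc) []
  ((pyCombinations diff_pairs num_swaps).foldl (pvAStep seq_str cs) ([], PySem.Set.empty)).1

-- ===== PORT B =====
def pvMaxMatchRun (a b : List Char) : Nat :=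
  let st := (a.zip b).foldl (fun (p : Nat × Nat) xy =>
    if xy.1 = xy.2 then (p.1, p.2 + 1) else (max p.1 p.2, 0)) (0, 0)
  max st.1 st.2

-- Source B's recursive backtracking over diff_pairs: choose the next pair (if its
-- positions are unused) or skip it, in increasing index order
def pvBacktrack (pairs : List (Nat × Nat)) (need : Nat) (used : PySem.Set Nat) :
    List (List (Nat × Nat)) :=
  match need with
  | 0 => [[]]
  | need' + 1 =>
    match pairs with
    | [] => []
    | (i, j) :: rest =>
      (if used.contains i || used.contains j then []
       else (pvBacktrack rest need' (PySem.Set.add (PySem.Set.add used i) j)).map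
              (fun sel => (i, j) :: sel))
      ++ pvBacktrack rest (need' + 1) used

def pvApplySwaps (cs : List Char) (combo : List (Nat × Nat)) : List Char :=
  combo.foldl (fun l p =>
    let a := l.getD p.2 ' '
    let b := l.getD p.1 ' '
    (l.set p.1 a).set p.2 b) cs

def generate_mismatch_sequences_alt (seq_str : String) (num_mismatches : Int) : List (String × String) :=
  let cs := seq_str.toList
  let n := cs.length
  let num_swaps := (PySem.Int.floordiv num_mismatches 2).toNat
  let diff_pairs := (List.range n).flatMap (fun i =>
    ((List.range' (i + 1) (n - (i + 1))).filter (fun j => cs.getD i ' ' ≠ cs.getD j ' ')).map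
      (fun j => (i, j)))
  let selections := pvBacktrack diff_pairs num_swaps PySem.Set.empty
  let candidates := selections.map (fun combo => String.ofList (pvApplySwaps cs combo))
  let kept := (candidates.foldl (fun (st : List String × PySem.Set String) cand =>
      if st.2.contains cand then st
      else ((if cand ≠ seq_str ∧ pvMaxMatchRun cs cand.toList < 6 then st.1 ++ [cand] else st.1),
            PySem.Set.add st.2 cand)) ([], PySem.Set.empty)).1
  (PySem.List.enumerate kept).map (fun kc => ("PNA_mm_" ++ pvPad3 (kc.1.toNat + 1), kc.2))

-- ===== PRECONDITION & SPEC =====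
-- Pre_ excludes num_mismatches < 0, on which Python A raises ValueError (combinations with negative r).
def Pre_generate_mismatch_sequences (seq_str : String) (num_mismatches : Int) : Prop :=
  0 ≤ num_mismatches
instance (seq_str : String) (num_mismatches : Int) : Decidable (Pre_generate_mismatch_sequences seq_str num_mismatches) := by unfold Pre_generate_mismatch_sequences; infer_instance

def pvWitness_generate_mismatch_sequences : String × Int := ("ACGT", 2)

def Spec_generate_mismatch_sequences (seq_str : String) (num_mismatches : Int) (out : List (String × String)) : Prop := out = generate_mismatch_sequences_alt seq_str num_mismatches
instance (seq_str : String) (num_mismatches : Int) (out : List (String × String)) : Decidable (Spec_generate_mismatch_sequences seq_str num_mismatches out) := by unfold Spec_generate_mismatch_sequences; infer_instance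

-- ===== CLAIM (what is proved, stated in full; the proofs are below) =====
def Claim_equal_generate_mismatch_sequences : Prop := ∀ (seq_str : String) (num_mismatches : Int), Dom_generate_mismatch_sequences seq_str num_mismatches → Pre_generate_mismatch_sequences seq_str num_mismatches → Spec_generate_mismatch_sequences seq_str num_mismatches (generate_mismatch_sequences seq_str num_mismatches)


-- ===== LEMMAS AND PROOFS =====

-- positions of a combo, flattened
def pvPos (c : List (Nat × Nat)) : List Nat := c.flatMap (fun p => [p.1, p.2])

-- A's in-loop overlap test, generalised with a set of forbidden positions
def pvOk (used : PySem.Set Nat) (c : List (Nat × Nat)) : Bool :=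
  decide (pvPos c).Nodup && (pvPos c).all (fun x => !(PySem.Set.contains used x))

-- |set(l)| = |l| iff l has no duplicates
lemma pvOfList_length_lt (l : List Nat) (h : ¬ l.Nodup) :
    (PySem.Set.ofList l).length < l.length := by
  induction l with
  | nil => simp at h
  | cons x xs ih =>
    rw [PySem.Set.ofList_cons]
    simp only [List.length_cons]
    by_cases hx : x ∈ xs
    · have hxo : x ∈ PySem.Set.ofList xs := (PySem.Set.mem_ofList _ _).mpr hx
      have : ((PySem.Set.ofList xs).discard x).length < (PySem.Set.ofList xs).length := by
        unfold PySem.Set.discard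
        apply List.length_filter_lt_length_iff_exists.mpr
        exact ⟨x, hxo, by simp⟩
      have h2 := PySem.Set.length_ofList_le xs
      omega
    · have hnd : ¬ xs.Nodup := by
        intro hnd; exact h (List.nodup_cons.mpr ⟨hx, hnd⟩)
      have h1 := ih hnd
      have : ((PySem.Set.ofList xs).discard x).length ≤ (PySem.Set.ofList xs).length :=
        List.length_filter_le _ _
      omega

lemma pvOfList_length_iff (l : List Nat) :
    (PySem.Set.ofList l).length = l.length ↔ l.Nodup := by
  constructor
  · intro h
    by_contra hnd
    have := pvOfList_length_lt l hnd
    omega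
  · intro h; rw [PySem.Set.ofList_eq_self_of_nodup l h]

-- pvBacktrack enumerates exactly the combinations whose positions are fresh and pairwise distinct
lemma pvContains_false_iff {α : Type} [BEq α] [LawfulBEq α] (s : PySem.Set α) (x : α) :
    (PySem.Set.contains s x = false) ↔ x ∉ s := by
  rw [← Bool.not_eq_true, not_iff_not]
  exact PySem.Set.contains_iff s x

lemma pvOk_cons (used : PySem.Set Nat) (i j : Nat) (c : List (Nat × Nat)) (hij : i ≠ j) :
    pvOk used ((i, j) :: c)
      = ((!(PySem.Set.contains used i) && !(PySem.Set.contains used j))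
          && pvOk (PySem.Set.add (PySem.Set.add used i) j) c) := by
  have hpos : pvPos ((i, j) :: c) = i :: j :: pvPos c := by simp [pvPos]
  rw [Bool.eq_iff_iff]
  simp only [pvOk, hpos, Bool.and_eq_true, List.all_eq_true, Bool.not_eq_true',
    decide_eq_true_eq, List.nodup_cons, List.mem_cons, pvContains_false_iff,
    PySem.Set.mem_add]
  constructor
  · rintro ⟨⟨hi, hj, hnd⟩, hall⟩
    refine ⟨⟨hall i (Or.inl rfl), hall j (Or.inr (Or.inl rfl))⟩, hnd, ?_⟩
    intro x hx
    have h1 := hall x (Or.inr (Or.inr hx))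
    have hxi : ¬ x = i := fun h => hi (Or.inr (h ▸ hx))
    have hxj : ¬ x = j := fun h => hj (h ▸ hx)
    tauto
  · rintro ⟨⟨hci, hcj⟩, hnd, hall⟩
    refine ⟨⟨?_, ?_, hnd⟩, ?_⟩
    · rintro (h | hi)
      · exact hij h
      · exact (hall i hi) (Or.inl (Or.inr rfl))
    · intro hj
      exact (hall j hj) (Or.inr rfl)
    · rintro x (rfl | rfl | hx)
      · exact fun h => hci h
      · exact fun h => hcj h
      · exact fun h => (hall x hx) (Or.inl (Or.inl h))

lemma pyCombinations_eq_nil {α : Type} (l : List α) (k : Nat) (h : l.length < k) :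
    pyCombinations l k = [] := by
  rw [pyCombinations.eq_def, if_pos h]

lemma pyCombinations_zero {α : Type} (l : List α) : pyCombinations l 0 = [[]] := by
  rw [pyCombinations.eq_def, if_neg (by omega)]

lemma pvBacktrack_eq_filter (pairs : List (Nat × Nat)) :
    ∀ (k : Nat) (used : PySem.Set Nat), (∀ p ∈ pairs, p.1 ≠ p.2) →
    pvBacktrack pairs k used = (pyCombinations pairs k).filter (pvOk used) := by
  induction pairs with
  | nil =>
    intro k used _
    cases k with
    | zero => simp [pvBacktrack, pyCombinations_zero, pvOk, pvPos]
    | succ k => simp [pvBacktrack, pyCombinations_eq_nil]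
  | cons hd rest ih =>
    intro k used hne
    obtain ⟨i, j⟩ := hd
    have hij : i ≠ j := hne (i, j) (List.mem_cons_self)
    have hne' : ∀ p ∈ rest, p.1 ≠ p.2 := fun p hp => hne p (List.mem_cons_of_mem _ hp)
    cases k with
    | zero => simp [pvBacktrack, pyCombinations_zero, pvOk, pvPos]
    | succ k =>
      have hbt : pvBacktrack ((i, j) :: rest) (k + 1) used
          = (if used.contains i || used.contains j then []
             else (pvBacktrack rest k (PySem.Set.add (PySem.Set.add used i) j)).map
               (fun sel => (i, j) :: sel)) ++ pvBacktrack rest (k + 1) used := rfl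
      rw [hbt]
      by_cases hlen : rest.length + 1 < k + 1
      · rw [pyCombinations_eq_nil _ _ (by simpa using hlen)]
        rw [ih (k + 1) used hne', ih k (PySem.Set.add (PySem.Set.add used i) j) hne']
        rw [pyCombinations_eq_nil rest k (by omega), pyCombinations_eq_nil rest (k + 1) (by omega)]
        simp
      · rw [show pyCombinations ((i, j) :: rest) (k + 1)
              = (pyCombinations rest k).map (fun c => (i, j) :: c) ++ pyCombinations rest (k + 1)
            from by rw [pyCombinations.eq_def, if_neg (by simpa using hlen)]]
        rw [List.filter_append, List.filter_map, ih (k + 1) used hne']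
        congr 1
        have hcomp : (pvOk used ∘ fun c => (i, j) :: c)
            = fun c => ((!(PySem.Set.contains used i) && !(PySem.Set.contains used j))
                && pvOk (PySem.Set.add (PySem.Set.add used i) j) c) := by
          funext c
          exact pvOk_cons used i j c hij
        rw [hcomp]
        by_cases hc : (used.contains i || used.contains j) = true
        · rw [if_pos hc]
          have : (fun c => ((!(PySem.Set.contains used i) && !(PySem.Set.contains used j))
                && pvOk (PySem.Set.add (PySem.Set.add used i) j) c)) = fun _ => false := by
            funext c
            rcases Bool.or_eq_true_iff.mp hc with h | h
            · rw [h]; rfl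
            · rw [h]; cases used.contains i <;> rfl
          rw [this]
          simp
        · rw [if_neg hc]
          have hci : used.contains i = false := by
            revert hc; cases used.contains i <;> simp
          have hcj : used.contains j = false := by
            revert hc; cases used.contains i <;> cases used.contains j <;> simp
          have : (fun c => ((!(PySem.Set.contains used i) && !(PySem.Set.contains used j))
                && pvOk (PySem.Set.add (PySem.Set.add used i) j) c))
              = fun c => pvOk (PySem.Set.add (PySem.Set.add used i) j) c := by
            funext c; rw [hci, hcj]; rfl
          rw [this, ih k _ hne']

  -- skipping elements a fold ignores
lemma pvFoldl_filter_of_skip {α β : Type} (l : List α) (p : α → Bool) (f : β → α → β) (s : β)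
    (h : ∀ s' x, x ∈ l → p x = false → f s' x = s') :
    l.foldl f s = (l.filter p).foldl f s := by
  induction l generalizing s with
  | nil => rfl
  | cons x xs ih =>
    by_cases hp : p x
    · simp [List.filter_cons, hp]
      exact ih (f s x) (fun s' y hy => h s' y (List.mem_cons_of_mem _ hy))
    · simp only [List.filter_cons, Bool.not_eq_true] at hp ⊢
      rw [List.foldl_cons, h s x (List.mem_cons_self) (by simp [hp]), hp]
      simp
      exact ih s (fun s' y hy => h s' y (List.mem_cons_of_mem _ hy))

-- the longest run of `true` in the match sequence, with an open run of length c
def pvM : List (Char × Char) → Nat → Nat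
  | [], c => c
  | ab :: l, c => if ab.1 = ab.2 then pvM l (c + 1) else max c (pvM l 0)

lemma pvM_ge (l : List (Char × Char)) : ∀ c, c ≤ pvM l c := by
  induction l with
  | nil => intro c; simp [pvM]
  | cons ab l ih =>
    intro c
    by_cases h : ab.1 = ab.2
    · simpa [pvM, h] using Nat.le_trans (Nat.le_succ c) (ih (c+1))
    · simp [pvM, h]

lemma pvFoldA_max (l : List (Char × Char)) : ∀ m c, c ≤ m →
    (l.foldl (fun (p : Nat × Nat) ab =>
      if ab.1 = ab.2 then (max p.1 (p.2 + 1), p.2 + 1) else (p.1, 0)) (m, c)).1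
      = max m (pvM l c) := by
  induction l with
  | nil => intro m c h; simp [pvM]; omega
  | cons ab l ih =>
    intro m c h
    by_cases hab : ab.1 = ab.2
    · simp only [List.foldl_cons, hab, if_true]
      rw [ih (max m (c+1)) (c+1) (Nat.le_max_right _ _)]
      have := pvM_ge l (c+1)
      simp [pvM, hab]
      omega
    · simp only [List.foldl_cons, if_neg hab]
      rw [ih m 0 (Nat.zero_le _)]
      simp [pvM, hab]
      omega

lemma pvFoldB_max (l : List (Char × Char)) : ∀ m c,
    (let st := l.foldl (fun (p : Nat × Nat) xy =>
      if xy.1 = xy.2 then (p.1, p.2 + 1) else (max p.1 p.2, 0)) (m, c)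
     max st.1 st.2) = max m (pvM l c) := by
  induction l with
  | nil => intro m c; simp [pvM]
  | cons ab l ih =>
    intro m c
    by_cases hab : ab.1 = ab.2
    · simpa [hab, pvM] using ih m (c+1)
    · simp only [List.foldl_cons, if_neg hab]
      rw [show pvM (ab :: l) c = max c (pvM l 0) by simp [pvM, hab]]
      have := ih (max m c) 0
      simp at this ⊢
      omega

lemma pvMaxMatchRun_eq (a b : List Char) : pvMaxMatchRun a b = pvM (a.zip b) 0 := by
  have h := pvFoldB_max (a.zip b) 0 0
  simpa [pvMaxMatchRun] using h

-- A's step, with the (already-true) overlap check removed and expressed via B's helpers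
def pvAStep2 (seq_str : String) (cs : List Char)
    (st : List (String × String) × PySem.Set String)
    (c : List (Nat × Nat)) : List (String × String) × PySem.Set String :=
  let cand := String.ofList (pvApplySwaps cs c)
  if st.2.contains cand ∨ cand = seq_str then st
  else if 6 ≤ pvMaxMatchRun cs cand.toList then st
  else (st.1 ++ [("PNA_mm_" ++ pvPad3 (st.1.length + 1), cand)], PySem.Set.add st.2 cand)

lemma pvAStep_eq (seq_str : String) (cs : List Char)
    (st : List (String × String) × PySem.Set String) (c : List (Nat × Nat))
    (h : pvOk PySem.Set.empty c = true) :
    pvAStep seq_str cs st c = pvAStep2 seq_str cs st c := by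
  have hfold : c.foldl (fun acc p => acc ++ [p.1, p.2]) [] = pvPos c := by
    simpa [pvPos] using PySem.List.foldl_append_eq_flatMap (fun p : Nat × Nat => [p.1, p.2]) c []
  have hnd : (pvPos c).Nodup := by
    have := (Bool.and_eq_true _ _).mp h
    exact of_decide_eq_true this.1
  have hlen : (PySem.Set.ofList (pvPos c)).length = (pvPos c).length :=
    (pvOfList_length_iff _).mpr hnd
  have hmc : ∀ l : List Char,
      ((cs.zip l).foldl (fun (p : Nat × Nat) ab =>
        if ab.1 = ab.2 then (max p.1 (p.2 + 1), p.2 + 1) else (p.1, 0)) (0, 0)).1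
        = pvMaxMatchRun cs l := by
    intro l
    rw [pvFoldA_max (cs.zip l) 0 0 (Nat.le_refl 0), pvMaxMatchRun_eq]
    simp
  simp only [pvAStep, pvAStep2, hfold, hlen, ne_eq, not_true_eq_false, if_false,
    pvApplySwaps, String.toList_ofList, hmc]

-- B's step on a candidate string
def pvBStep (seq_str : String) (cs : List Char)
    (st : List String × PySem.Set String) (cand : String) : List String × PySem.Set String :=
  if st.2.contains cand then st
  else ((if cand ≠ seq_str ∧ pvMaxMatchRun cs cand.toList < 6 then st.1 ++ [cand] else st.1),
        PySem.Set.add st.2 cand)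

-- B's fold only appends to the kept list
lemma pvBFold_prefix (seq_str : String) (cs : List Char) (l : List String) :
    ∀ (L0 : List String) (S : PySem.Set String),
    l.foldl (pvBStep seq_str cs) (L0, S)
      = (L0 ++ (l.foldl (pvBStep seq_str cs) ([], S)).1,
         (l.foldl (pvBStep seq_str cs) ([], S)).2) := by
  induction l with
  | nil => intro L0 S; simp
  | cons x xs ih =>
    intro L0 S
    rw [List.foldl_cons, List.foldl_cons]
    by_cases hc : x ∈ S
    · have hcc : S.contains x = true := (PySem.Set.contains_iff S x).mpr hc
      rw [show pvBStep seq_str cs (L0, S) x = (L0, S) by simp only [pvBStep]; rw [if_pos hcc],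
          show pvBStep seq_str cs ([], S) x = ([], S) by simp only [pvBStep]; rw [if_pos hcc]]
      exact ih L0 S
    · have hcc : ¬ (S.contains x = true) := fun hx => hc ((PySem.Set.contains_iff S x).mp hx)
      by_cases hk : x ≠ seq_str ∧ pvMaxMatchRun cs x.toList < 6
      · rw [show pvBStep seq_str cs (L0, S) x = (L0 ++ [x], PySem.Set.add S x) by
              simp only [pvBStep]; rw [if_neg hcc, if_pos hk],
            show pvBStep seq_str cs ([], S) x = ([x], PySem.Set.add S x) by
              simp only [pvBStep]; rw [if_neg hcc, if_pos hk]; rfl]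
        rw [ih (L0 ++ [x]), ih [x]]
        simp
      · rw [show pvBStep seq_str cs (L0, S) x = (L0, PySem.Set.add S x) by
              simp only [pvBStep]; rw [if_neg hcc, if_neg hk],
            show pvBStep seq_str cs ([], S) x = ([], PySem.Set.add S x) by
              simp only [pvBStep]; rw [if_neg hcc, if_neg hk]]
        exact ih L0 _

-- naming from an offset
def pvNamed : Nat → List String → List (String × String)
  | _, [] => []
  | m, c :: L => ("PNA_mm_" ++ pvPad3 (m + 1), c) :: pvNamed (m + 1) L

lemma pvEnumerate_named (L : List String) : ∀ (m : Nat),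
    (PySem.List.enumerate L (m : Int)).map (fun kc => ("PNA_mm_" ++ pvPad3 (kc.1.toNat + 1), kc.2))
      = pvNamed m L := by
  induction L with
  | nil => intro m; simp [PySem.List.enumerate_nil, pvNamed]
  | cons c L ih =>
    intro m
    rw [PySem.List.enumerate_cons, List.map_cons]
    have : ((m : Int) + 1) = ((m + 1 : Nat) : Int) := by push_cast; ring
    rw [this, ih (m + 1)]
    simp [pvNamed]

-- a string rejected by B's filter
def pvBad (seq_str : String) (cs : List Char) (x : String) : Prop :=
  x = seq_str ∨ 6 ≤ pvMaxMatchRun cs x.toList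

-- invariant relating A's `seen` (only accepted strings) and B's `seen` (all candidates)
def pvRel (seq_str : String) (cs : List Char) (SA SB : PySem.Set String) : Prop :=
  (∀ x, x ∈ SA → x ∈ SB) ∧ (∀ x, x ∈ SB → x ∉ SA → pvBad seq_str cs x)

lemma pvMain (seq_str : String) (cs : List Char) :
    ∀ (sel : List (List (Nat × Nat))) (R : List (String × String)) (SA SB : PySem.Set String),
    pvRel seq_str cs SA SB →
    (sel.foldl (pvAStep2 seq_str cs) (R, SA)).1
        = R ++ pvNamed R.length
            ((sel.foldl (fun st c => pvBStep seq_str cs st (String.ofList (pvApplySwaps cs c)))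
              ([], SB)).1)
    ∧ pvRel seq_str cs
        (sel.foldl (pvAStep2 seq_str cs) (R, SA)).2
        ((sel.foldl (fun st c => pvBStep seq_str cs st (String.ofList (pvApplySwaps cs c)))
          ([], SB)).2) := by
  intro sel
  induction sel with
  | nil =>
    intro R SA SB hrel
    exact ⟨by simp [pvNamed], hrel⟩
  | cons c sel ih =>
    intro R SA SB hrel
    obtain ⟨hsub, hbad⟩ := hrel
    rw [List.foldl_cons, List.foldl_cons]
    by_cases hSB : String.ofList (pvApplySwaps cs c) ∈ SB
    · have hB : pvBStep seq_str cs ([], SB) (String.ofList (pvApplySwaps cs c)) = ([], SB) := by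
        simp only [pvBStep]
        rw [if_pos ((PySem.Set.contains_iff SB _).mpr hSB)]
      have hA : pvAStep2 seq_str cs (R, SA) c = (R, SA) := by
        simp only [pvAStep2]
        by_cases hSA : String.ofList (pvApplySwaps cs c) ∈ SA
        · rw [if_pos (Or.inl ((PySem.Set.contains_iff SA _).mpr hSA))]
        · by_cases hcs : String.ofList (pvApplySwaps cs c) = seq_str
          · rw [if_pos (Or.inr hcs)]
          · rcases hbad _ hSB hSA with hc | hr
            · exact absurd hc hcs
            · rw [if_neg (by
                rintro (hco | hco)
                · exact hSA ((PySem.Set.contains_iff SA _).mp hco)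
                · exact hcs hco), if_pos hr]
      rw [hA, hB]
      exact ih R SA SB ⟨hsub, hbad⟩
    · have hSA : String.ofList (pvApplySwaps cs c) ∉ SA := fun h => hSB (hsub _ h)
      have hccB : ¬ (SB.contains (String.ofList (pvApplySwaps cs c)) = true) :=
        fun h => hSB ((PySem.Set.contains_iff SB _).mp h)
      by_cases hcs : String.ofList (pvApplySwaps cs c) = seq_str
      · have hA : pvAStep2 seq_str cs (R, SA) c = (R, SA) := by
          simp only [pvAStep2]; rw [if_pos (Or.inr hcs)]
        have hB : pvBStep seq_str cs ([], SB) (String.ofList (pvApplySwaps cs c))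
            = ([], PySem.Set.add SB (String.ofList (pvApplySwaps cs c))) := by
          simp only [pvBStep]
          rw [if_neg hccB, if_neg (by rintro ⟨h1, _⟩; exact h1 hcs)]
        rw [hA, hB]
        refine ih R SA _ ⟨fun x hx => (PySem.Set.mem_add _ _ _).mpr (Or.inl (hsub x hx)), ?_⟩
        intro x hx hnx
        rcases (PySem.Set.mem_add _ _ _).mp hx with hx' | rfl
        · exact hbad x hx' hnx
        · exact Or.inl hcs
      · by_cases hrun : pvMaxMatchRun cs (String.ofList (pvApplySwaps cs c)).toList < 6
        · -- accepted by both
          have hA : pvAStep2 seq_str cs (R, SA) c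
              = (R ++ [("PNA_mm_" ++ pvPad3 (R.length + 1), String.ofList (pvApplySwaps cs c))],
                 PySem.Set.add SA (String.ofList (pvApplySwaps cs c))) := by
            simp only [pvAStep2]
            rw [if_neg (by
                rintro (hco | hco)
                · exact hSA ((PySem.Set.contains_iff SA _).mp hco)
                · exact hcs hco),
              if_neg (by omega)]
          have hB : pvBStep seq_str cs ([], SB) (String.ofList (pvApplySwaps cs c))
              = ([String.ofList (pvApplySwaps cs c)],
                 PySem.Set.add SB (String.ofList (pvApplySwaps cs c))) := by
            simp only [pvBStep]
            rw [if_neg hccB, if_pos ⟨hcs, hrun⟩]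
            rfl
          rw [hA, hB]
          have hrel' : pvRel seq_str cs
              (PySem.Set.add SA (String.ofList (pvApplySwaps cs c)))
              (PySem.Set.add SB (String.ofList (pvApplySwaps cs c))) := by
            refine ⟨?_, ?_⟩
            · intro x hx
              rcases (PySem.Set.mem_add _ _ _).mp hx with hx' | rfl
              · exact (PySem.Set.mem_add _ _ _).mpr (Or.inl (hsub x hx'))
              · exact (PySem.Set.mem_add _ _ _).mpr (Or.inr rfl)
            · intro x hx hnx
              rcases (PySem.Set.mem_add _ _ _).mp hx with hx' | rfl
              · exact hbad x hx' (fun h => hnx ((PySem.Set.mem_add _ _ _).mpr (Or.inl h)))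
              · exact absurd ((PySem.Set.mem_add _ _ _).mpr (Or.inr rfl)) hnx
          obtain ⟨h1, h2⟩ := ih
            (R ++ [("PNA_mm_" ++ pvPad3 (R.length + 1), String.ofList (pvApplySwaps cs c))])
            _ _ hrel'
          have hmap : ∀ (st : List String × PySem.Set String),
              sel.foldl (fun st c => pvBStep seq_str cs st (String.ofList (pvApplySwaps cs c))) st
                = (sel.map (fun c => String.ofList (pvApplySwaps cs c))).foldl
                    (pvBStep seq_str cs) st := by
            intro st; rw [List.foldl_map]
          rw [hmap, pvBFold_prefix]
          rw [hmap] at h1 h2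
          constructor
          · rw [h1]
            simp only [List.length_append, List.length_cons, List.length_nil, Nat.zero_add]
            rw [List.append_assoc]
            rfl
          · exact h2
        · -- rejected by the run filter: A skips, B only records it as seen
          have hA : pvAStep2 seq_str cs (R, SA) c = (R, SA) := by
            simp only [pvAStep2]
            rw [if_neg (by
                rintro (hco | hco)
                · exact hSA ((PySem.Set.contains_iff SA _).mp hco)
                · exact hcs hco),
              if_pos (by omega)]
          have hB : pvBStep seq_str cs ([], SB) (String.ofList (pvApplySwaps cs c))
              = ([], PySem.Set.add SB (String.ofList (pvApplySwaps cs c))) := by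
            simp only [pvBStep]
            rw [if_neg hccB, if_neg (by rintro ⟨_, h2⟩; exact hrun h2)]
          rw [hA, hB]
          refine ih R SA _ ⟨fun x hx => (PySem.Set.mem_add _ _ _).mpr (Or.inl (hsub x hx)), ?_⟩
          intro x hx hnx
          rcases (PySem.Set.mem_add _ _ _).mp hx with hx' | rfl
          · exact hbad x hx' hnx
          · exact Or.inr (by omega)

-- the two diff_pairs constructions agree, and every pair has distinct coordinates
lemma pvDiffPairs_eq (cs : List Char) (n : Nat) :
    (List.range n).foldl (fun acc i =>
      (List.range' (i + 1) (n - (i + 1))).foldl (fun acc2 j =>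
        if cs.getD i ' ' ≠ cs.getD j ' ' then acc2 ++ [(i, j)] else acc2) acc) []
    = (List.range n).flatMap (fun i =>
      ((List.range' (i + 1) (n - (i + 1))).filter (fun j => cs.getD i ' ' ≠ cs.getD j ' ')).map
        (fun j => (i, j))) := by
  have inner : ∀ (i : Nat) (acc : List (Nat × Nat)),
      (List.range' (i + 1) (n - (i + 1))).foldl (fun acc2 j =>
        if cs.getD i ' ' ≠ cs.getD j ' ' then acc2 ++ [(i, j)] else acc2) acc
      = acc ++ ((List.range' (i + 1) (n - (i + 1))).filter
          (fun j => cs.getD i ' ' ≠ cs.getD j ' ')).map (fun j => (i, j)) := by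
    intro i acc
    have h := PySem.List.foldl_append_if (fun j => decide (cs.getD i ' ' ≠ cs.getD j ' '))
      (fun j => ((i, j) : Nat × Nat)) (List.range' (i + 1) (n - (i + 1))) acc
    simpa using h
  calc (List.range n).foldl (fun acc i =>
      (List.range' (i + 1) (n - (i + 1))).foldl (fun acc2 j =>
        if cs.getD i ' ' ≠ cs.getD j ' ' then acc2 ++ [(i, j)] else acc2) acc) []
      = (List.range n).foldl (fun acc i => acc ++
          ((List.range' (i + 1) (n - (i + 1))).filter
            (fun j => cs.getD i ' ' ≠ cs.getD j ' ')).map (fun j => (i, j))) [] := by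
        apply PySem.List.foldl_congr_mem
        intro acc i _
        exact inner i acc
    _ = _ := by
        rw [PySem.List.foldl_append_eq_flatMap]
        simp

lemma pvDiffPairs_ne (cs : List Char) (n : Nat) :
    ∀ p ∈ (List.range n).flatMap (fun i =>
      ((List.range' (i + 1) (n - (i + 1))).filter (fun j => cs.getD i ' ' ≠ cs.getD j ' ')).map
        (fun j => (i, j))), p.1 ≠ p.2 := by
  intro p hp
  simp only [List.mem_flatMap, List.mem_map, List.mem_filter] at hp
  obtain ⟨i, _, j, ⟨hj, _⟩, rfl⟩ := hp
  have := List.mem_range'_1.mp hj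
  simp only []
  omega

-- ===== VERDICT (by name: the statement is the Claim_ definition above) =====
lemma pvOk_empty (c : List (Nat × Nat)) :
    pvOk PySem.Set.empty c = decide (pvPos c).Nodup := by
  simp [pvOk, PySem.Set.empty, PySem.Set.contains]

lemma pvAStep_skip (seq_str : String) (cs : List Char)
    (st : List (String × String) × PySem.Set String) (c : List (Nat × Nat))
    (h : pvOk PySem.Set.empty c = false) :
    pvAStep seq_str cs st c = st := by
  have hfold : c.foldl (fun acc p => acc ++ [p.1, p.2]) [] = pvPos c := by
    simpa [pvPos] using PySem.List.foldl_append_eq_flatMap (fun p : Nat × Nat => [p.1, p.2]) c []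
  have hnd : ¬ (pvPos c).Nodup := by
    rw [pvOk_empty] at h
    simpa using h
  have hlen : (PySem.Set.ofList (pvPos c)).length ≠ (pvPos c).length :=
    fun hl => hnd ((pvOfList_length_iff _).mp hl)
  simp only [pvAStep, hfold]
  rw [if_pos hlen]

theorem generate_mismatch_sequences_spec : Claim_equal_generate_mismatch_sequences := by
  unfold Claim_equal_generate_mismatch_sequences
  intro seq_str num_mismatches _ _
  unfold Spec_generate_mismatch_sequences
  unfold generate_mismatch_sequences generate_mismatch_sequences_alt
  simp only []
  rw [pvDiffPairs_eq seq_str.toList seq_str.toList.length]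
  set cs := seq_str.toList with hcs
  set n := cs.length with hn
  set k := (PySem.Int.floordiv num_mismatches 2).toNat with hk
  set dp := (List.range n).flatMap (fun i =>
    ((List.range' (i + 1) (n - (i + 1))).filter (fun j => cs.getD i ' ' ≠ cs.getD j ' ')).map
      (fun j => (i, j))) with hdp
  -- A's fold: drop overlapping combos, replace the step by its check-free form
  rw [pvFoldl_filter_of_skip (pyCombinations dp k) (pvOk PySem.Set.empty)
      (pvAStep seq_str cs) ([], PySem.Set.empty)
      (fun st c _ hf => pvAStep_skip seq_str cs st c hf)]
  rw [← pvBacktrack_eq_filter dp k PySem.Set.empty (pvDiffPairs_ne cs n)]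
  rw [PySem.List.foldl_congr_mem (pvBacktrack dp k PySem.Set.empty)
      (pvAStep seq_str cs) (pvAStep2 seq_str cs) ([], PySem.Set.empty)
      (fun st c hc => pvAStep_eq seq_str cs st c
        (by
          rw [pvBacktrack_eq_filter dp k PySem.Set.empty (pvDiffPairs_ne cs n)] at hc
          exact (List.mem_filter.mp hc).2))]
  -- B's fold over candidate strings = composed fold over selections
  rw [List.foldl_map]
  -- main correspondence
  have hrel : pvRel seq_str cs PySem.Set.empty PySem.Set.empty :=
    ⟨fun x hx => hx, fun x hx => absurd hx (by simp [PySem.Set.empty])⟩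
  obtain ⟨h1, _⟩ := pvMain seq_str cs (pvBacktrack dp k PySem.Set.empty) [] _ _ hrel
  have he := pvEnumerate_named
    ((pvBacktrack dp k PySem.Set.empty).foldl
      (fun st c => pvBStep seq_str cs st (String.ofList (pvApplySwaps cs c)))
      ([], PySem.Set.empty)).1 0
  simp only [Nat.cast_zero] at he
  refine h1.trans ?_
  simp only [List.nil_append, List.length_nil]
  exact he.symm
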